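-- pv_equiv track=rewrite | github.com/Conor-Doyle-29/Final-Year-Project | Artefact/studyScore.py | studyscore
-- ===== SOURCE A (Python) =====
-- def studyscore(sound,time,temp,water):
--     studyscore = 500
--     hyrdration=0
--     if sound > 32:
--         studyscore-=200
--     else:
--         studyscore+=200
--
--     if temp > 20 and temp<23:
--         studyscore+=200
--     else:
--         studyscore-=200
--     for i in time:
--
--         if i > 0:
--             if i>= (791628094):
--                 studyscore+= 50
--             if i>= (791628094*2):
--                 studyscore-= 50
--
--     for i in range(0,3):
--         if water >= 2500:
--             hyrdration+=1
--         if hyrdration>0: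
--             studyscore=studyscore+(hyrdration*50)
--
--     return studyscore
-- ===== SOURCE B (Python) =====
-- def studyscore(sound, time, temp, water):
--     T = 791628094
--     ts = sorted(time)
--
--     def first_at_least(x):
--         # first index in the sorted list whose element is >= x (hand-rolled binary search)
--         a, b = 0, len(ts)
--         while a < b:
--             m = (a + b) // 2
--             if ts[m] < x:
--                 a = m + 1
--             else:
--                 b = m
--         return a
--
--     base = (300 if sound > 32 else 700) + (200 if 20 < temp < 23 else -200)
--     in_band = first_at_least(2 * T) - first_at_least(T)  # how many times lie in [T, 2T)
--     return base + 50 * in_band + (300 if water >= 2500 else 0)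
-- ===== Notes on version B (the rewrite author's own statement) =====
-- stated objective: alternative
-- what changed: B sorts the time list and locates the band [T,2T) with a hand-rolled binary search (count = difference of two lower bounds) instead of A's per-element scan, and collapses the range(0,3) hydration loop to a flat +300 when water >= 2500.
import Mathlib
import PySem

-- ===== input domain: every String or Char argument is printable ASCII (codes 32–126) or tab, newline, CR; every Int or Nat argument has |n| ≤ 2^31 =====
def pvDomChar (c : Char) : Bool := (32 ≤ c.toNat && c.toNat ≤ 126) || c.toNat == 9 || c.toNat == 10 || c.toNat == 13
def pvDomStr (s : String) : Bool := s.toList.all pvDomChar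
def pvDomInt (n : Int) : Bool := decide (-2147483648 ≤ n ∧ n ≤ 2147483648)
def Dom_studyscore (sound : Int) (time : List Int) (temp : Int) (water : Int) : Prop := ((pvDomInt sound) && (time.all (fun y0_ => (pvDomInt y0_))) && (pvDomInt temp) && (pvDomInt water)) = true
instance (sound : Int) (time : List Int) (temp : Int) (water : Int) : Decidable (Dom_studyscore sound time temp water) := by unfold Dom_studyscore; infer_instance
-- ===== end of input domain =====

-- B sorts the time list and counts the band [T,2T) by a hand-rolled binary search, with a closed-form hydration bonus; objective: alternative.


-- ===== PORT A =====
def studyscore (sound : Int) (time : List Int) (temp : Int) (water : Int) : Int :=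
  let s0 : Int := 500
  let h0 : Int := 0
  let s1 : Int := if sound > 32 then s0 - 200 else s0 + 200
  let s2 : Int := if temp > 20 ∧ temp < 23 then s1 + 200 else s1 - 200
  let s3 : Int := time.foldl (fun s i =>
    if i > 0 then
      let s' := if i ≥ 791628094 then s + 50 else s
      if i ≥ 791628094 * 2 then s' - 50 else s'
    else s) s2
  let p : Int × Int := (PySem.List.pyRange 0 3 1).foldl (fun (p : Int × Int) _ =>
    let h' := if water ≥ 2500 then p.2 + 1 else p.2
    let s' := if h' > 0 then p.1 + h' * 50 else p.1
    (s', h')) (s3, h0)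
  p.1

-- ===== PORT B =====
-- the while a < b binary-search loop of Source B (index arithmetic is on Nat: a, b are
-- nonnegative list indices in Python too, so this is exact); ts[m] is in range whenever
-- a < b ≤ len ts, ported as getD with an arbitrary default
def bsLoop (ts : List Int) (x : Int) (a b : Nat) : Nat :=
  if h : a < b then
    if ts.getD ((a + b) / 2) 0 < x then bsLoop ts x ((a + b) / 2 + 1) b
    else bsLoop ts x a ((a + b) / 2)
  else a
termination_by b - a
decreasing_by all_goals omega

def studyscore_alt (sound : Int) (time : List Int) (temp : Int) (water : Int) : Int :=
  let t : Int := 791628094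
  let ts : List Int := PySem.List.sorted time (fun x => x) false
  let firstAtLeast : Int → Nat := fun x => bsLoop ts x 0 ts.length
  let base : Int := (if sound > 32 then 300 else 700) + (if 20 < temp ∧ temp < 23 then 200 else -200)
  let inBand : Int := (firstAtLeast (2 * t) : Int) - (firstAtLeast t : Int)
  base + 50 * inBand + (if water ≥ 2500 then 300 else 0)

-- ===== PRECONDITION & SPEC =====
def Spec_studyscore (sound : Int) (time : List Int) (temp : Int) (water : Int) (out : Int) : Prop := out = studyscore_alt sound time temp water
instance (sound : Int) (time : List Int) (temp : Int) (water : Int) (out : Int) : Decidable (Spec_studyscore sound time temp water out) := by unfold Spec_studyscore; infer_instance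

-- ===== CLAIM (what is proved, stated in full; the proofs are below) =====
def Claim_equal_studyscore : Prop := ∀ (sound : Int) (time : List Int) (temp : Int) (water : Int), Dom_studyscore sound time temp water → Spec_studyscore sound time temp water (studyscore sound time temp water)

-- ===== LEMMAS AND PROOFS =====

-- A's time-loop equals start + 50*(count ≥ T) - 50*(count ≥ 2T).
theorem timeLoop_eq (time : List Int) : ∀ (s : Int),
    time.foldl (fun s i =>
      if i > 0 then
        let s' := if i ≥ 791628094 then s + 50 else s
        if i ≥ 791628094 * 2 then s' - 50 else s'
      else s) s
    = s + 50 * ((time.countP (fun i => i ≥ (791628094:Int)) : Int)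
              - (time.countP (fun i => i ≥ 791628094 * 2) : Int)) := by
  induction time with
  | nil => intro s; simp
  | cons i rest ih =>
    intro s
    simp only [List.foldl_cons, List.countP_cons, ih]
    by_cases h1 : i ≥ (791628094:Int) <;> by_cases h2 : i ≥ (791628094:Int) * 2 <;>
      simp only [decide_eq_true_eq] <;> split_ifs <;> push_cast <;> omega

-- A's hydration loop over range(0,3): +300 iff water ≥ 2500.
theorem hydLoop_eq (water s : Int) :
    ((PySem.List.pyRange 0 3 1).foldl (fun (p : Int × Int) _ =>
      let h' := if water ≥ 2500 then p.2 + 1 else p.2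
      let s' := if h' > 0 then p.1 + h' * 50 else p.1
      (s', h')) (s, 0)).1
    = if water ≥ 2500 then s + 300 else s := by
  by_cases hw : water ≥ 2500 <;>
    simp [PySem.List.pyRange, List.range_succ, hw] <;> ring

-- a list whose first r elements are < x and whose remaining elements are ≥ x has exactly r elements < x
theorem countP_eq_of_bracket : ∀ (ts : List Int) (x : Int) (r : Nat), r ≤ ts.length →
    (∀ i (h : i < ts.length), i < r → ts[i] < x) →
    (∀ i (h : i < ts.length), r ≤ i → x ≤ ts[i]) →
    ts.countP (fun y => decide (y < x)) = r := by
  intro ts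
  induction ts with
  | nil => intro x r hr _ _; simp at hr ⊢; omega
  | cons t rest ih =>
    intro x r hr hlt hge
    cases r with
    | zero =>
      have h0 : x ≤ t := hge 0 (by simp) (by omega)
      have htail : rest.countP (fun y => decide (y < x)) = 0 := by
        apply ih x 0 (by omega) (by omega)
        intro i h _
        exact hge (i+1) (by simpa using Nat.succ_lt_succ h) (by omega)
      simp [List.countP_cons, htail, not_lt.mpr h0]
    | succ r' =>
      have h0 : t < x := hlt 0 (by simp) (by omega)
      have htail : rest.countP (fun y => decide (y < x)) = r' := by
        apply ih x r' (by simpa using hr)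
        · intro i h hi
          exact hlt (i+1) (by simpa using Nat.succ_lt_succ h) (by omega)
        · intro i h hi
          exact hge (i+1) (by simpa using Nat.succ_lt_succ h) (by omega)
      simp [List.countP_cons, htail, h0]

-- the binary search on a monotone list returns the number of elements < x
theorem bsLoop_spec (ts : List Int) (x : Int)
    (hmono : ∀ i j (hij : i ≤ j) (hj : j < ts.length), ts[i]'(by omega) ≤ ts[j]) :
    ∀ (n a b : Nat), b - a ≤ n → a ≤ b → b ≤ ts.length →
    (∀ i (h : i < ts.length), i < a → ts[i] < x) →
    (∀ i (h : i < ts.length), b ≤ i → x ≤ ts[i]) →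
    bsLoop ts x a b = ts.countP (fun y => decide (y < x)) := by
  intro n
  induction n with
  | zero =>
    intro a b hn hab hb hlo hhi
    have hab' : a = b := by omega
    rw [bsLoop]
    simp only [hab', lt_irrefl, dite_false]
    exact (countP_eq_of_bracket ts x b hb (fun i h hi => hlo i h (by omega)) hhi).symm
  | succ n ih =>
    intro a b hn hab hb hlo hhi
    rw [bsLoop]
    by_cases h : a < b
    · simp only [h, dite_true]
      have hm : (a + b) / 2 < ts.length := by omega
      have hget : ts.getD ((a + b) / 2) 0 = ts[(a + b) / 2] := List.getD_eq_getElem ts 0 hm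
      by_cases hc : ts[(a + b) / 2] < x
      · rw [hget, if_pos hc]
        apply ih ((a + b) / 2 + 1) b (by omega) (by omega) hb
        · intro i hi hia
          exact lt_of_le_of_lt (hmono i ((a + b) / 2) (by omega) hm) hc
        · exact hhi
      · rw [hget, if_neg hc]
        apply ih a ((a + b) / 2) (by omega) (by omega) (by omega) hlo
        intro i hi hia
        exact le_trans (not_lt.mp hc) (hmono ((a + b) / 2) i hia hi)
    · simp only [h, dite_false]
      have hab' : a = b := by omega
      subst hab'
      exact (countP_eq_of_bracket ts x a hb (fun i h hi => hlo i h (by omega)) hhi).symm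

-- firstAtLeast on the sorted copy counts the elements of time below x
theorem firstAtLeast_eq (time : List Int) (x : Int) :
    (bsLoop (PySem.List.sorted time (fun x => x) false) x 0
        (PySem.List.sorted time (fun x => x) false).length : Nat)
    = time.countP (fun y => decide (y < x)) := by
  set ts := PySem.List.sorted time (fun x => x) false with hts
  have hpw : ts.Pairwise (· ≤ ·) := by
    simpa using PySem.List.sorted_pairwise time (fun x => x)
  have hmono : ∀ i j (hij : i ≤ j) (hj : j < ts.length), ts[i]'(by omega) ≤ ts[j] := by
    intro i j hij hj
    rcases Nat.eq_or_lt_of_le hij with rfl | h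
    · exact le_refl _
    · exact (List.pairwise_iff_getElem.mp hpw) i j (by omega) hj h
  have := bsLoop_spec ts x hmono (ts.length) 0 ts.length (by omega) (by omega) (le_refl _)
      (by intro i h hi; omega) (by intro i h hi; omega)
  rw [this]
  exact ((PySem.List.sorted_perm time (fun x => x) false).countP_eq _)

-- ===== VERDICT (by name: the statement is the Claim_ definition above) =====
theorem studyscore_spec : Claim_equal_studyscore := by
  intro sound time temp water _
  show _ = _
  simp only [studyscore, studyscore_alt, timeLoop_eq, hydLoop_eq, firstAtLeast_eq]
  have hT : time.countP (fun i => i ≥ (791628094:Int))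
      = time.length - time.countP (fun y => decide (y < (791628094:Int))) := by
    have := time.length_eq_countP_add_countP (fun y => decide (y < (791628094:Int)))
    have hc : time.countP (fun i => i ≥ (791628094:Int))
        = time.countP (fun y => ¬ (decide (y < (791628094:Int)) = true)) := by
      apply List.countP_congr; intro y _; simp
    omega
  have h2T : time.countP (fun i => i ≥ (791628094:Int) * 2)
      = time.length - time.countP (fun y => decide (y < 2 * (791628094:Int))) := by
    have := time.length_eq_countP_add_countP (fun y => decide (y < 2 * (791628094:Int)))
    have hc : time.countP (fun i => i ≥ (791628094:Int) * 2)
        = time.countP (fun y => ¬ (decide (y < 2 * (791628094:Int)) = true)) := by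
      apply List.countP_congr; intro y _; simp
    omega
  have hleT : time.countP (fun y => decide (y < (791628094:Int))) ≤ time.length :=
    List.countP_le_length
  have hle2T : time.countP (fun y => decide (y < 2 * (791628094:Int))) ≤ time.length :=
    List.countP_le_length
  rw [hT, h2T]
  split_ifs <;> omega
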